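-- pv_equiv track=rewrite | github.com/alexandree11/Practices | .vscode/py/rec1.1.py | contains_consecutive_duplicate
-- ===== SOURCE A (Python) =====
-- def contains_consecutive_duplicate(lst):
--     if len(lst) <= 1:     #if theres only 1 num there could not be 2 consec duplicates
--         return False
--     else:
--         if lst[0] == lst[1]:    #if 1st == next == True:
--             return True
--         else:
--             return (contains_consecutive_duplicate(lst[1:]))    #function recall with updated lst
-- ===== SOURCE B (Python) =====
-- def contains_consecutive_duplicate(lst):
--     prev = None
--     have_prev = False
--     for x in lst:
--         if have_prev and x == prev:
--             return True
--         prev = x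
--         have_prev = True
--     return False
-- ===== Notes on version B (the rewrite author's own statement) =====
-- stated objective: faster
-- what changed: Replaces A's recursion that copies the tail with lst[1:] at every step by a single iterative pass that keeps the previous element and compares it to the current one.
import Mathlib
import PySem

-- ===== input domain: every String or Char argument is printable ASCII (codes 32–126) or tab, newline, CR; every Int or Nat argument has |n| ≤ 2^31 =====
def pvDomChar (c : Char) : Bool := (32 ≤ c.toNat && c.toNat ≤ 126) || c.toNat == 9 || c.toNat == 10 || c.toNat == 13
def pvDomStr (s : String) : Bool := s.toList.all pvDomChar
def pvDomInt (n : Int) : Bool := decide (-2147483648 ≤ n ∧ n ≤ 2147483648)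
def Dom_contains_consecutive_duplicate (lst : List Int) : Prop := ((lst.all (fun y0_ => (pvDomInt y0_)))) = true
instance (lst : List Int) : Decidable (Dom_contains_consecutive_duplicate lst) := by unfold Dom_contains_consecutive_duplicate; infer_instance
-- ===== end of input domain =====

-- B replaces A's tail-copying recursion by one iterative pass tracking the previous element (faster).

-- ===== PORT A =====
-- Literal port of A: length test, compare lst[0] with lst[1], recurse on lst[1:].
def contains_consecutive_duplicate (lst : List Int) : Bool :=
  if lst.length ≤ 1 then false
  else
    match lst with
    | a :: b :: rest => if a = b then true else contains_consecutive_duplicate (b :: rest)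
    | _ => false
termination_by lst.length

-- ===== PORT B =====
-- B's loop: carry the previous element (none before the first iteration).
def pvAltLoop (prev : Option Int) : List Int → Bool
  | [] => false
  | x :: xs => if prev = some x then true else pvAltLoop (some x) xs

def contains_consecutive_duplicate_alt (lst : List Int) : Bool :=
  pvAltLoop none lst

-- ===== PRECONDITION & SPEC =====
def Spec_contains_consecutive_duplicate (lst : List Int) (out : Bool) : Prop := out = contains_consecutive_duplicate_alt lst
instance (lst : List Int) (out : Bool) : Decidable (Spec_contains_consecutive_duplicate lst out) := by unfold Spec_contains_consecutive_duplicate; infer_instance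

-- ===== CLAIM (what is proved, stated in full; the proofs are below) =====
def Claim_equal_contains_consecutive_duplicate : Prop := ∀ (lst : List Int), Dom_contains_consecutive_duplicate lst → Spec_contains_consecutive_duplicate lst (contains_consecutive_duplicate lst)

-- ===== LEMMAS AND PROOFS =====
theorem pvAltLoop_eq (xs : List Int) : ∀ (x : Int), pvAltLoop (some x) xs = contains_consecutive_duplicate (x :: xs) := by
  induction xs with
  | nil => intro x; simp [pvAltLoop, contains_consecutive_duplicate]
  | cons y ys ih =>
    intro x
    by_cases h : x = y
    · simp [pvAltLoop, contains_consecutive_duplicate, h]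
    · simp only [pvAltLoop, contains_consecutive_duplicate, List.length_cons]
      have hxy : ¬ (some x = some y) := by simpa using h
      simp [h, hxy, ih y]

-- ===== VERDICT (by name: the statement is the Claim_ definition above) =====
theorem contains_consecutive_duplicate_spec : Claim_equal_contains_consecutive_duplicate := by
  intro lst _
  unfold Spec_contains_consecutive_duplicate contains_consecutive_duplicate_alt
  cases lst with
  | nil => simp [contains_consecutive_duplicate, pvAltLoop]
  | cons x xs => simp [pvAltLoop, pvAltLoop_eq]
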